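-- pv_equiv track=rewrite | github.com/coder1408/MIT-WPU-Assignments | Semester 5/ICS/Assignment2.py | feistel_encrypt
-- ===== SOURCE A (Python) =====
-- def feistel_function(data, key):
--     # Example Feistel function: simple XOR with the key
--     return data ^ key
--
-- def feistel_encrypt(plaintext, rounds, key):
--     # Split plaintext into left and right halves
--     left = plaintext >> 8
--     right = plaintext & 0xFF
--
--     for _ in range(rounds):
--         temp = right
--         right = left ^ feistel_function(right, key)
--         left = temp
--
--     # Combine left and right halves
--     ciphertext = (left << 8) | right
--     return ciphertext
-- ===== SOURCE B (Python) =====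
-- def feistel_encrypt(plaintext, rounds, key):
--     # The Feistel round map (l, r) -> (r, l ^ r ^ key) has period 3 (XOR is an
--     # involution), so only rounds mod 3 effective rounds are needed: O(1).
--     left = plaintext >> 8
--     right = plaintext & 0xFF
--     n = rounds % 3 if rounds > 0 else 0
--     if n == 1:
--         left, right = right, left ^ right ^ key
--     elif n == 2:
--         left, right = left ^ right ^ key, left
--     return (left << 8) | right
-- ===== Notes on version B (the rewrite author's own statement) =====
-- stated objective: faster
-- what changed: The round map (l,r)->(r, l^r^key) is an XOR-involution composition with period 3, so B replaces the loop over all rounds by a direct computation of the state after rounds mod 3 steps.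
import Mathlib
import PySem

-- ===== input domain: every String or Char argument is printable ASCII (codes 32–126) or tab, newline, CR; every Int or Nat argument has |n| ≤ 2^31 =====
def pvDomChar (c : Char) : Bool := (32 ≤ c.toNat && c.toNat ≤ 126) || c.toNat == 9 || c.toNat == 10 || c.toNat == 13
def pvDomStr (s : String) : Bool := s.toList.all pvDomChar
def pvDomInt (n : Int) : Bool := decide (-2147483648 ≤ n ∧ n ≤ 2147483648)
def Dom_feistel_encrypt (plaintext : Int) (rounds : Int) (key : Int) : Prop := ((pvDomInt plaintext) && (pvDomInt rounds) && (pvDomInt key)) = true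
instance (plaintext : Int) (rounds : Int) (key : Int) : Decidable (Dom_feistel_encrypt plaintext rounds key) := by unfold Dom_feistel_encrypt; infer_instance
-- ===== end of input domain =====

-- B replaces A's loop over all rounds by the state after rounds mod 3 round-map steps
-- (the round map has period 3); proved equal to A on all inputs.

-- ===== PORT A =====
def feistel_function (data : Int) (key : Int) : Int := PySem.Int.bxor data key

def feistel_encrypt (plaintext : Int) (rounds : Int) (key : Int) : Int :=
  let left := plaintext >>> 8
  let right := PySem.Int.band plaintext 0xFF
  let s := (PySem.List.pyRange 0 rounds).foldl
    (fun (s : Int × Int) _ =>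
      let temp := s.2
      let right := PySem.Int.bxor s.1 (feistel_function s.2 key)
      (temp, right)) (left, right)
  PySem.Int.bor (s.1 <<< 8) s.2

-- ===== PORT B =====
def feistel_encrypt_alt (plaintext : Int) (rounds : Int) (key : Int) : Int :=
  let left := plaintext >>> 8
  let right := PySem.Int.band plaintext 0xFF
  let n : Int := if rounds > 0 then PySem.Int.mod rounds 3 else 0
  let s : Int × Int :=
    if n = 1 then (right, PySem.Int.bxor (PySem.Int.bxor left right) key)
    else if n = 2 then (PySem.Int.bxor (PySem.Int.bxor left right) key, left)
    else (left, right)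
  PySem.Int.bor (s.1 <<< 8) s.2

-- ===== PRECONDITION & SPEC =====
def Spec_feistel_encrypt (plaintext : Int) (rounds : Int) (key : Int) (out : Int) : Prop := out = feistel_encrypt_alt plaintext rounds key
instance (plaintext : Int) (rounds : Int) (key : Int) (out : Int) : Decidable (Spec_feistel_encrypt plaintext rounds key out) := by unfold Spec_feistel_encrypt; infer_instance

-- ===== CLAIM (what is proved, stated in full; the proofs are below) =====
def Claim_equal_feistel_encrypt : Prop := ∀ (plaintext : Int) (rounds : Int) (key : Int), Dom_feistel_encrypt plaintext rounds key → Spec_feistel_encrypt plaintext rounds key (feistel_encrypt plaintext rounds key)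

-- ===== LEMMAS AND PROOFS =====

-- XOR algebra for PySem.Int.bxor
theorem bxor_np (m n : Nat) : PySem.Int.bxor (↑m) (-↑n - 1) = -↑(m ^^^ n) - 1 := by
  unfold PySem.Int.bxor
  have h1 : ¬ (0 : Int) ≤ -↑n - 1 := by omega
  have e : (-(-(n : Int) - 1) - 1) = (n : Int) := by ring
  simp only [h1, Int.natCast_nonneg, if_true, if_false, e, Int.toNat_natCast]

theorem bxor_pn (m n : Nat) : PySem.Int.bxor (-↑m - 1) (↑n) = -↑(m ^^^ n) - 1 := by
  unfold PySem.Int.bxor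
  have h1 : ¬ (0 : Int) ≤ -↑m - 1 := by omega
  have e : (-(-(m : Int) - 1) - 1) = (m : Int) := by ring
  simp only [h1, Int.natCast_nonneg, if_true, if_false, e, Int.toNat_natCast]

theorem bxor_nn (m n : Nat) : PySem.Int.bxor (-↑m - 1) (-↑n - 1) = ↑(m ^^^ n) := by
  unfold PySem.Int.bxor
  have h1 : ¬ (0 : Int) ≤ -↑m - 1 := by omega
  have h2 : ¬ (0 : Int) ≤ -↑n - 1 := by omega
  have em : (-(-(m : Int) - 1) - 1) = (m : Int) := by ring
  have en : (-(-(n : Int) - 1) - 1) = (n : Int) := by ring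
  simp only [h1, h2, if_false, em, en, Int.toNat_natCast]

theorem int_cases_rep (a : Int) : (∃ m : Nat, a = ↑m) ∨ (∃ m : Nat, a = -↑m - 1) := by
  cases a with
  | ofNat m => exact Or.inl ⟨m, rfl⟩
  | negSucc m => exact Or.inr ⟨m, by simp [Int.negSucc_eq]; ring⟩

theorem bxor_assoc (a b c : Int) :
    PySem.Int.bxor (PySem.Int.bxor a b) c = PySem.Int.bxor a (PySem.Int.bxor b c) := by
  rcases int_cases_rep a with ⟨m, rfl⟩ | ⟨m, rfl⟩ <;>
  rcases int_cases_rep b with ⟨n, rfl⟩ | ⟨n, rfl⟩ <;>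
  rcases int_cases_rep c with ⟨p, rfl⟩ | ⟨p, rfl⟩ <;>
  simp [PySem.Int.bxor_natCast, bxor_np, bxor_pn, bxor_nn, Nat.xor_assoc]

-- the Feistel round map
def fstep (key : Int) (s : Int × Int) : Int × Int :=
  (s.2, PySem.Int.bxor s.1 (PySem.Int.bxor s.2 key))

theorem bxor_left_comm (a b c : Int) :
    PySem.Int.bxor a (PySem.Int.bxor b c) = PySem.Int.bxor b (PySem.Int.bxor a c) := by
  rw [← bxor_assoc, PySem.Int.bxor_comm a b, bxor_assoc]

theorem zero_bxor (a : Int) : PySem.Int.bxor 0 a = a := by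
  rw [PySem.Int.bxor_comm, PySem.Int.bxor_zero]

theorem bxor_cancel (a b : Int) : PySem.Int.bxor a (PySem.Int.bxor a b) = b := by
  rw [← bxor_assoc, PySem.Int.bxor_self, zero_bxor]

theorem fstep3 (key : Int) (s : Int × Int) : fstep key (fstep key (fstep key s)) = s := by
  obtain ⟨l, r⟩ := s
  simp [fstep, bxor_left_comm, PySem.Int.bxor_comm, bxor_cancel,
    PySem.Int.bxor_self, PySem.Int.bxor_zero]

theorem fstep_iterate_mod3 (key : Int) (n : Nat) (s : Int × Int) :
    (fstep key)^[n] s = (fstep key)^[n % 3] s := by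
  induction n using Nat.strong_induction_on with
  | _ n ih =>
    by_cases h : n < 3
    · rw [Nat.mod_eq_of_lt h]
    · have h3 : n = (n - 3) + 3 := by omega
      rw [h3, Function.iterate_add_apply]
      have : (fstep key)^[3] s = s := fstep3 key s
      rw [this, ih (n - 3) (by omega)]
      congr 1
      omega

theorem foldl_const_iterate {α β : Type} (f : α → α) (xs : List β) (init : α) :
    xs.foldl (fun s _ => f s) init = f^[xs.length] init := by
  induction xs generalizing init with
  | nil => rfl
  | cons x xs ih => simp [List.foldl, ih, Function.iterate_succ_apply]

theorem fstep_eq_loop_body (key : Int) :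
    (fun (s : Int × Int) (_ : Int) =>
      (s.2, PySem.Int.bxor s.1 (feistel_function s.2 key))) = fun s _ => fstep key s := by
  funext s _
  simp [fstep, feistel_function]

-- ===== VERDICT (by name: the statement is the Claim_ definition above) =====
theorem feistel_encrypt_spec : Claim_equal_feistel_encrypt := by
  intro plaintext rounds key _
  show feistel_encrypt plaintext rounds key = feistel_encrypt_alt plaintext rounds key
  unfold feistel_encrypt feistel_encrypt_alt
  simp only [fstep_eq_loop_body, foldl_const_iterate, PySem.List.length_pyRange_one]
  set l := plaintext >>> 8
  set r := PySem.Int.band plaintext 0xFF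
  by_cases hpos : rounds > 0
  · have hmod : PySem.Int.mod rounds 3 = rounds % 3 := PySem.Int.mod_eq_emod_of_pos (by omega)
    have htn : (rounds - 0).toNat % 3 = (rounds % 3).toNat := by omega
    rw [fstep_iterate_mod3, htn]
    have h3 : (rounds % 3).toNat < 3 := by omega
    simp only [if_pos hpos, hmod]
    interval_cases h : (rounds % 3).toNat
    · have : rounds % 3 = 0 := by omega
      simp [this, Function.iterate_zero]
    · have : rounds % 3 = 1 := by omega
      simp [this, fstep, bxor_left_comm, PySem.Int.bxor_comm]
    · have : rounds % 3 = 2 := by omega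
      simp [this, fstep, bxor_left_comm, PySem.Int.bxor_comm, bxor_cancel, zero_bxor]
  · have : (rounds - 0).toNat = 0 := by omega
    rw [this]
    simp [if_neg hpos]
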